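-- pv_equiv track=rewrite | github.com/dylantzx/Digital-World | Week 4/Exqn2.py | interlock
-- ===== SOURCE A (Python) =====
-- def interlock(word1,word2,word3):
--     ans = word1, word2, word3
--     length1 = len(word1)
--     length2 = len(word2)
--     #if word 1 and word 2 interlock and generates word 3, True
--     #if word1,2,3 are left blank, False
--     #words length not same, empty string, cannot interlock
--     if length1 != length2 or length1 == 0 or length2 == 0 :
--         return False
--     else:
--         string = ""
--         i=0
--         for char in word2:
--             string += word1[i]
--             string += char
--             i+=1
--         if string == word3:
--             return True
--         else:
--             return False
-- ===== SOURCE B (Python) =====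
-- def interlock(word1, word2, word3):
--     # same guard as the original
--     if len(word1) != len(word2) or len(word1) == 0 or len(word2) == 0:
--         return False
--     # de-interleave word3 with strided slices instead of building a string in a loop
--     return word3[::2] == word1 and word3[1::2] == word2
-- ===== Notes on version B (the rewrite author's own statement) =====
-- stated objective: idiomatic
-- what changed: Instead of looping over word2 with an index to concatenate an interleaved string and comparing it to word3, B de-interleaves word3 with the strided slices word3[::2] and word3[1::2] and compares them to word1 and word2; no loop, no accumulator.
import Mathlib
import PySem

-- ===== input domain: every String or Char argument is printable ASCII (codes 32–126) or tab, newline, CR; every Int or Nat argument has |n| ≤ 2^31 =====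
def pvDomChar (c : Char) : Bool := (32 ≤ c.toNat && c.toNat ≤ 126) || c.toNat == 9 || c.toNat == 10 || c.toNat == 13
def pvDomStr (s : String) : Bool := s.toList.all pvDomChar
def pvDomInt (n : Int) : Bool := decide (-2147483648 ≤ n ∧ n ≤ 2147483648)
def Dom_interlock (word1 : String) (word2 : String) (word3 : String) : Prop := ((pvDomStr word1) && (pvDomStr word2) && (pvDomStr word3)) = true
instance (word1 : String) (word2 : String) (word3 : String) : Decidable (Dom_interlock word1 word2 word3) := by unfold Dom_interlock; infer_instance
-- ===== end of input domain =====

-- B replaces A's index loop that concatenates an interleaved string by comparing the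
-- strided slices word3[::2] and word3[1::2] to word1 and word2 (idiomatic, loop-free).

-- ===== PORT A =====
-- A's loop over word2 with index i, building `string`; the string is kept as List Char
-- (exact for comparison: two Strings are equal iff their character lists are).
-- word1[i] is in range whenever the loop runs (guard forces equal nonzero lengths),
-- so the `.getD` default is never used where Python returns.
def interlock (word1 : String) (word2 : String) (word3 : String) : Bool :=
  let length1 := word1.toList.length
  let length2 := word2.toList.length
  if length1 ≠ length2 ∨ length1 = 0 ∨ length2 = 0 then
    false
  else
    let st := word2.toList.foldl
      (fun (acc : List Char × Int) char =>
        (acc.1 ++ [(PySem.List.pyGet? word1.toList acc.2).getD char, char], acc.2 + 1))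
      ([], 0)
    if st.1 = word3.toList then true else false

-- ===== PORT B =====
-- Source B: same guard, then word3[::2] == word1 and word3[1::2] == word2 via PySem slices.
def interlock_alt (word1 : String) (word2 : String) (word3 : String) : Bool :=
  if word1.toList.length ≠ word2.toList.length ∨ word1.toList.length = 0 ∨ word2.toList.length = 0 then
    false
  else
    (PySem.List.slice? word3.toList none none 2 == some word1.toList) &&
    (PySem.List.slice? word3.toList (some 1) none 2 == some word2.toList)

-- ===== PRECONDITION & SPEC =====
def Spec_interlock (word1 : String) (word2 : String) (word3 : String) (out : Bool) : Prop := out = interlock_alt word1 word2 word3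
instance (word1 : String) (word2 : String) (word3 : String) (out : Bool) : Decidable (Spec_interlock word1 word2 word3 out) := by unfold Spec_interlock; infer_instance

-- ===== CLAIM (what is proved, stated in full; the proofs are below) =====
def Claim_equal_interlock : Prop := ∀ (word1 : String) (word2 : String) (word3 : String), Dom_interlock word1 word2 word3 → Spec_interlock word1 word2 word3 (interlock word1 word2 word3)

-- ===== LEMMAS AND PROOFS =====

/-- the interleaving of two lists (stops at the shorter). -/
def pvInterleave : List Char → List Char → List Char
  | a :: as, b :: bs => a :: b :: pvInterleave as bs
  | _, _ => []

/-- even-indexed elements. -/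
def pvEvens : List Char → List Char
  | [] => []
  | [a] => [a]
  | a :: _ :: t => a :: pvEvens t

/-- odd-indexed elements. -/
def pvOdds : List Char → List Char
  | [] => []
  | _ :: t => pvEvens t

theorem pvEvens_cons (x : Char) (t : List Char) : pvEvens (x :: t) = x :: pvOdds t := by
  cases t <;> simp [pvEvens, pvOdds]

theorem pvInterleave_nil (xs : List Char) : pvInterleave xs [] = [] := by
  cases xs <;> simp [pvInterleave]

theorem pv_filt_evens (xs : List Char) :
    List.filterMap (fun k => xs[2 * k]?) (List.range ((xs.length + 1) / 2)) = pvEvens xs := by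
  induction xs using pvEvens.induct with
  | case1 => simp [pvEvens]
  | case2 a => simp [pvEvens]
  | case3 a b t ih =>
    have hl : ((a :: b :: t).length + 1) / 2 = (t.length + 1) / 2 + 1 := by
      simp; omega
    rw [hl, List.range_succ_eq_map, List.filterMap_cons, List.filterMap_map]
    simp only [Function.comp]
    have : ∀ k, (a :: b :: t)[2 * Nat.succ k]? = t[2 * k]? := by
      intro k
      have h2 : 2 * Nat.succ k = (2 * k + 1) + 1 := by omega
      rw [h2, List.getElem?_cons_succ, List.getElem?_cons_succ]
    simp only [this]
    simp [pvEvens, ih]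

theorem pv_slice_evens (xs : List Char) :
    PySem.List.slice? xs none none 2 = some (pvEvens xs) := by
  rw [PySem.List.slice?, PySem.List.sliceIndices]
  simp only [if_neg (by norm_num : ¬ ((2:Int) = 0)), if_neg (by norm_num : ¬ ((2:Int) < 0))]
  rcases Nat.eq_zero_or_pos xs.length with h | h
  · have hx : xs = [] := List.eq_nil_of_length_eq_zero h
    subst hx; simp [pvEvens]
  · rw [if_pos (by norm_num : (0:Int) < 2), if_pos (by exact_mod_cast h : (0:Int) < (xs.length:Int))]
    have hcnt : (((xs.length : Int) - 0 + 2 - 1) / 2).toNat = (xs.length + 1) / 2 := by omega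
    rw [hcnt]
    have harg : ∀ k : Nat, ((0 : Int) + 2 * (k : Int)).toNat = 2 * k := by intro k; omega
    simp only [harg]
    rw [pv_filt_evens]

theorem pv_slice_odds (xs : List Char) :
    PySem.List.slice? xs (some 1) none 2 = some (pvOdds xs) := by
  rw [PySem.List.slice?, PySem.List.sliceIndices]
  simp only [if_neg (by norm_num : ¬ ((2:Int) = 0)), if_neg (by norm_num : ¬ ((2:Int) < 0)),
    if_neg (by norm_num : ¬ ((1:Int) < 0))]
  cases xs with
  | nil =>
    simp [pvOdds]
  | cons a t =>
    have hs : min (1 : Int) ((a :: t).length : Int) = 1 := by simp only [List.length_cons]; push_cast; omega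
    rw [hs, if_pos (by norm_num : (0:Int) < 2)]
    by_cases ht : (1 : Int) < ((a :: t).length : Int)
    · rw [if_pos ht]
      have hcnt : ((((a :: t).length : Int) - 1 + 2 - 1) / 2).toNat = (t.length + 1) / 2 := by
        simp only [List.length_cons] at ht ⊢; push_cast at ht ⊢; omega
      rw [hcnt]
      have harg : ∀ k : Nat, (a :: t)[((1 : Int) + 2 * (k : Int)).toNat]? = t[2 * k]? := by
        intro k
        have h2 : ((1 : Int) + 2 * (k : Int)).toNat = 2 * k + 1 := by omega
        rw [h2, List.getElem?_cons_succ]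
      simp only [harg]
      rw [pv_filt_evens]; rfl
    · rw [if_neg ht]
      have hlen : t.length = 0 := by simp only [List.length_cons, not_lt] at ht; push_cast at ht; omega
      have hx : t = [] := List.eq_nil_of_length_eq_zero hlen
      subst hx; simp [pvOdds, pvEvens]

theorem pv_core (l1 : List Char) : ∀ (l2 w3 : List Char), l1.length = l2.length →
    (pvInterleave l1 l2 = w3 ↔ (pvEvens w3 = l1 ∧ pvOdds w3 = l2)) := by
  induction l1 with
  | nil =>
    intro l2 w3 h
    have : l2 = [] := by
      cases l2 with | nil => rfl | cons b bs => simp at h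
    subst this
    cases w3 with
    | nil => simp [pvInterleave, pvEvens, pvOdds]
    | cons x t => simp [pvInterleave, pvEvens_cons]
  | cons a as ih =>
    intro l2 w3 h
    cases l2 with
    | nil => simp at h
    | cons b bs =>
      cases w3 with
      | nil => simp [pvInterleave, pvEvens, pvOdds]
      | cons x t =>
        cases t with
        | nil =>
          simp [pvInterleave, pvEvens, pvOdds]
        | cons y t' =>
          have h' : as.length = bs.length := by simp at h; omega
          simp [pvInterleave, pvEvens_cons, pvOdds, ih bs t' h']
          tauto

theorem pv_fold (w1l : List Char) : ∀ (l2 s : List Char) (i : Nat),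
    w1l.length = i + l2.length →
    (l2.foldl
      (fun (acc : List Char × Int) char =>
        (acc.1 ++ [(PySem.List.pyGet? w1l acc.2).getD char, char], acc.2 + 1))
      (s, (i : Int))).1 = s ++ pvInterleave (w1l.drop i) l2 := by
  intro l2
  induction l2 with
  | nil =>
    intro s i h
    simp [pvInterleave_nil]
  | cons c l2' ih =>
    intro s i h
    have hi : i < w1l.length := by simp at h; omega
    have hget : PySem.List.pyGet? w1l ((i : Nat) : Int) = some w1l[i] := by
      simp [PySem.List.pyGet?_natCast, List.getElem?_eq_getElem hi]
    have hdrop : w1l.drop i = w1l[i] :: w1l.drop (i + 1) := (List.getElem_cons_drop hi).symm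
    have hcast : ((i : Int) + 1) = (((i + 1 : Nat)) : Int) := by push_cast; ring
    simp only [List.foldl_cons, hget, Option.getD_some, hcast]
    rw [ih (s ++ [w1l[i], c]) (i + 1) (by simp at h ⊢; omega)]
    rw [hdrop]
    simp [pvInterleave]

-- ===== VERDICT (by name: the statement is the Claim_ definition above) =====
theorem interlock_spec : Claim_equal_interlock := by
  intro word1 word2 word3 _
  unfold Spec_interlock interlock interlock_alt
  by_cases hg : word1.toList.length ≠ word2.toList.length ∨ word1.toList.length = 0 ∨ word2.toList.length = 0
  · simp only [if_pos hg]
  · simp only [if_neg hg]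
    push Not at hg
    obtain ⟨heq, _, _⟩ := hg
    have hfold := pv_fold word1.toList word2.toList [] 0 (by simpa using heq)
    simp only [Nat.cast_zero] at hfold
    simp only [hfold, List.drop_zero, List.nil_append]
    rw [pv_slice_evens, pv_slice_odds]
    have hcore := pv_core word1.toList word2.toList word3.toList heq
    by_cases hc : pvInterleave word1.toList word2.toList = word3.toList
    · rw [if_pos hc]
      obtain ⟨h1, h2⟩ := hcore.mp hc
      simp [h1, h2]
    · rw [if_neg hc]
      rw [hcore] at hc
      push Not at hc
      by_cases h1 : pvEvens word3.toList = word1.toList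
      · simp [h1, hc h1]
      · simp [h1]
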